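-- pv_equiv track=rewrite | github.com/Xheki-RF/ASM | asm.py | add_with_shift
-- ===== SOURCE A (Python) =====
-- ACM = 0
--
-- def add_with_shift(a):
--     result = 0
--     carry = 0
--
--     for i in range(8):
--         bit_a = (a >> i) & 1
--         bit_b = (ACM >> i) & 1
--
--         current_sum = bit_a ^ bit_b ^ carry
--         result |= current_sum << i
--
--         carry = (bit_a & bit_b) | (carry & (bit_a ^ bit_b))
--
--     return result
-- ===== SOURCE B (Python) =====
-- ACM = 0
--
-- def add_with_shift(a):
--     return (a + ACM) & 0xFF
-- ===== Notes on version B (the rewrite author's own statement) =====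
-- stated objective: simpler
-- what changed: Replaced the eight-iteration bit-by-bit ripple-carry addition loop with the closed-form masked sum (a + ACM) & 0xFF.
import Mathlib
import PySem

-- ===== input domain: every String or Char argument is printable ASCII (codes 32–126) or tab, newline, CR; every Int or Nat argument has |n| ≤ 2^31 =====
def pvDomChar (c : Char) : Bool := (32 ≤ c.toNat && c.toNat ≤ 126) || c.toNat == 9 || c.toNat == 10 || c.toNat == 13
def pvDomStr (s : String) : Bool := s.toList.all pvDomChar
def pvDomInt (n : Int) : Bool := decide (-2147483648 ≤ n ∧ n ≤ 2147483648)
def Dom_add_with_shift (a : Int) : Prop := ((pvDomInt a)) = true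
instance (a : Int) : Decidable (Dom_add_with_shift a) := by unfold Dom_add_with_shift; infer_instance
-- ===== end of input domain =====

-- B replaces the 8-step ripple-carry bit loop with the closed-form masked sum (a + ACM) & 0xFF (simpler).

-- ===== PORT A =====
def ACM : Int := 0

def add_with_shift (a : Int) : Int :=
  let st := (PySem.List.pyRange 0 8 1).foldl (fun (st : Int × Int) i =>
    let result := st.1
    let carry := st.2
    let bit_a := PySem.Int.band (a >>> i.toNat) 1
    let bit_b := PySem.Int.band (ACM >>> i.toNat) 1
    let current_sum := PySem.Int.bxor (PySem.Int.bxor bit_a bit_b) carry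
    let result' := PySem.Int.bor result (current_sum <<< i.toNat)
    let carry' := PySem.Int.bor (PySem.Int.band bit_a bit_b)
      (PySem.Int.band carry (PySem.Int.bxor bit_a bit_b))
    (result', carry')) ((0 : Int), (0 : Int))
  st.1

-- ===== PORT B =====
def add_with_shift_alt (a : Int) : Int :=
  PySem.Int.band (a + ACM) 255

-- ===== PRECONDITION & SPEC =====
def Spec_add_with_shift (a : Int) (out : Int) : Prop := out = add_with_shift_alt a
instance (a : Int) (out : Int) : Decidable (Spec_add_with_shift a out) := by unfold Spec_add_with_shift; infer_instance

-- ===== CLAIM (what is proved, stated in full; the proofs are below) =====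
def Claim_equal_add_with_shift : Prop := ∀ (a : Int), Dom_add_with_shift a → Spec_add_with_shift a (add_with_shift a)

-- ===== LEMMAS AND PROOFS =====

-- &-masking with 255 is reduction mod 256 (Python semantics, negatives included)
lemma band_mask (a : Int) : PySem.Int.band a 255 = a % 256 := by
  unfold PySem.Int.band
  have h255 : (255:Int).toNat = 2^8 - 1 := rfl
  by_cases h1 : 0 ≤ a
  · rw [if_pos h1, if_pos (by norm_num : (0:Int) ≤ 255), h255,
      Nat.and_two_pow_sub_one_eq_mod]
    norm_num; omega
  · rw [if_neg h1, if_pos (by norm_num : (0:Int) ≤ 255), h255, Nat.and_comm,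
      Nat.and_two_pow_sub_one_eq_mod]
    norm_num; omega

-- the bit-recombination expression A's loop reduces to (with ACM = 0)
def pvChain (x : Int) : Int :=
  PySem.Int.bor (PySem.Int.bor (PySem.Int.bor (PySem.Int.bor (PySem.Int.bor
    (PySem.Int.bor (PySem.Int.bor ((x >>> (0:Int) % 2) <<< (0:Int)) ((x >>> (1:Int) % 2) <<< (1:Int)))
    ((x >>> (2:Int) % 2) <<< (2:Int))) ((x >>> (3:Int) % 2) <<< (3:Int))) ((x >>> (4:Int) % 2) <<< (4:Int)))
    ((x >>> (5:Int) % 2) <<< (5:Int))) ((x >>> (6:Int) % 2) <<< (6:Int))) ((x >>> (7:Int) % 2) <<< (7:Int))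

set_option maxRecDepth 4096 in
lemma pvChain_fin : ∀ f : Fin 256, pvChain ((f.1 : Nat) : Int) = (f.1 : Int) := by decide

lemma pvChain_eq (x : Int) (h0 : 0 ≤ x) (h1 : x < 256) : pvChain x = x := by
  obtain ⟨n, hn, rfl⟩ : ∃ n : Nat, n < 256 ∧ x = (n : Int) := ⟨x.toNat, by omega, by omega⟩
  exact pvChain_fin ⟨n, hn⟩

-- a >>> (k : Int) is the Nat-exponent shift
lemma bridgeR (a : Int) (k : Nat) : a >>> ((k : Nat) : Int) = a >>> k := by
  show a <<< (-((k : Nat) : Int)) = a >>> k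
  cases a <;> cases k <;> rfl

-- the low 8 bits of a are the bits of a % 256
lemma bitkey (a : Int) (i : Int) (hi : 0 ≤ i) (h8 : i < 8) :
    a >>> i % 2 = (a % 256) >>> i % 2 := by
  obtain ⟨k, rfl⟩ : ∃ k : Nat, i = (k : Int) := ⟨i.toNat, by omega⟩
  rw [bridgeR, bridgeR, Int.shiftRight_eq_div_pow, Int.shiftRight_eq_div_pow]
  have hk : k < 8 := by omega
  interval_cases k <;> omega

lemma loop_eq_mod (a : Int) : add_with_shift a = a % 256 := by
  have hb0 : ∀ x : Int, PySem.Int.band 0 x = 0 := fun x => by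
    rw [PySem.Int.band_comm]; exact PySem.Int.band_zero x
  have hr0 : ∀ x : Int, PySem.Int.bor 0 x = x := fun x => by
    rw [PySem.Int.bor_comm]; exact PySem.Int.bor_zero x
  have hr : PySem.List.pyRange 0 8 1 = [0,1,2,3,4,5,6,7] := by decide
  simp only [add_with_shift, hr, List.foldl, ACM]
  norm_num [PySem.Int.band_zero, PySem.Int.bxor_zero, PySem.Int.bor_zero, PySem.Int.band_one,
    hb0, hr0]
  rw [bitkey a 0 (by norm_num) (by norm_num), bitkey a 1 (by norm_num) (by norm_num),
    bitkey a 2 (by norm_num) (by norm_num), bitkey a 3 (by norm_num) (by norm_num),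
    bitkey a 4 (by norm_num) (by norm_num), bitkey a 5 (by norm_num) (by norm_num),
    bitkey a 6 (by norm_num) (by norm_num), bitkey a 7 (by norm_num) (by norm_num)]
  exact pvChain_eq (a % 256) (Int.emod_nonneg a (by norm_num)) (Int.emod_lt_of_pos a (by norm_num))

-- ===== VERDICT (by name: the statement is the Claim_ definition above) =====
theorem add_with_shift_spec : Claim_equal_add_with_shift := by
  intro a _
  unfold Spec_add_with_shift add_with_shift_alt ACM
  rw [add_zero, band_mask]
  exact loop_eq_mod a
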